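-- pv_equiv track=rewrite | github.com/MARodriguez226/Practice-CFR-Implementations- | custom_cfr/game_library/shortest_deck/sd_extras/SD_preflop_flop_maker.py | make_flops
-- ===== SOURCE A (Python) =====
-- n_cards = [2,3,4,5,6,12,13,14,15,16,22,23,24,25,26,32,33,34,35,36]
--
-- def make_flops(player_hand,opp_hand):
--     """
--     11/6/23 unfinished
--     returns all the possible flops given the cards at play.
--     """
--     possible_num = n_cards.copy()
--     #possible_num = [2,3,4,5,12,13,14,15]
--     #need to optimize this
--     for num in player_hand:
--         if num in possible_num:
--             possible_num.remove(num)
--     for num in opp_hand: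
--         if num in possible_num:
--             possible_num.remove(num)
--
--     flops = []
--     for i in possible_num:
--         for j in possible_num:
--             for k in possible_num:
--                 if i != k and i !=j and j!= k and tuple(sorted((i,j,k))) not in flops:
--                     flops.append(tuple(sorted((i,j,k))))
--
--     return flops
-- ===== SOURCE B (Python) =====
-- n_cards = [2,3,4,5,6,12,13,14,15,16,22,23,24,25,26,32,33,34,35,36]
--
-- def choose(cards, k):
--     """All k-element combinations of cards, in order, as tuples."""
--     if k == 0:
--         return [()]
--     if not cards:
--         return []
--     first, rest = cards[0], cards[1:]
--     return [(first,) + c for c in choose(rest, k - 1)] + choose(rest, k)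
--
-- def make_flops(player_hand, opp_hand):
--     remaining = [c for c in n_cards if c not in player_hand and c not in opp_hand]
--     return choose(remaining, 3)
-- ===== Notes on version B (the rewrite author's own statement) =====
-- stated objective: faster
-- what changed: Replaces the triple nested loop over the whole deck with quadratic-scan deduplication (checking each sorted triple against the growing result list) by a recursive include/exclude combination generator that emits each 3-subset exactly once in the same lexicographic order, and replaces the remove-loop preamble by a single filter.
import Mathlib
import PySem

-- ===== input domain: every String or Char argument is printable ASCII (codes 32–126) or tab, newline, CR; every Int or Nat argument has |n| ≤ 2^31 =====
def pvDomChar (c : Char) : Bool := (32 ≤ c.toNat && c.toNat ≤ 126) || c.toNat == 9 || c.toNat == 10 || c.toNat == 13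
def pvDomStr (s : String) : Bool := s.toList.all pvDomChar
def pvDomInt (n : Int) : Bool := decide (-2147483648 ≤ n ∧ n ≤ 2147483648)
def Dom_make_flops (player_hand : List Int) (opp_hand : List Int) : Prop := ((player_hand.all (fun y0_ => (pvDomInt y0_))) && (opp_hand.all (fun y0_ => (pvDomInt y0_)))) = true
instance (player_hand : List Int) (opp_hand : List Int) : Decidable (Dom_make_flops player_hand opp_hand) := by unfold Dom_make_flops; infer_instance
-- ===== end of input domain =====

-- B replaces A's triple nested loop with membership-deduplication by a recursive
-- include/exclude combination generator emitting each 3-subset once, in the same order (objective: faster).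

-- ===== PORT A =====
def pvNCards : List Int := [2,3,4,5,6,12,13,14,15,16,22,23,24,25,26,32,33,34,35,36]

-- the two removal for-loops of A ("if num in possible_num: possible_num.remove(num)")
def pvRemoveLoop (possible : List Int) (hand : List Int) : List Int :=
  hand.foldl (fun acc num =>
    if num ∈ acc then (PySem.List.remove? acc num).getD acc else acc) possible

-- possible_num after the two removal loops
def pvPossible (player_hand : List Int) (opp_hand : List Int) : List Int :=
  pvRemoveLoop (pvRemoveLoop pvNCards player_hand) opp_hand

def make_flops (player_hand : List Int) (opp_hand : List Int) : List (List Int) :=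
  (pvPossible player_hand opp_hand).foldl (fun flops i =>
    (pvPossible player_hand opp_hand).foldl (fun flops j =>
      (pvPossible player_hand opp_hand).foldl (fun flops k =>
        if i ≠ k ∧ i ≠ j ∧ j ≠ k ∧ PySem.List.sorted [i, j, k] (fun x => x) false ∉ flops
        then flops ++ [PySem.List.sorted [i, j, k] (fun x => x) false]
        else flops) flops) flops) []

-- ===== PORT B =====
def pvNCardsB : List Int := [2,3,4,5,6,12,13,14,15,16,22,23,24,25,26,32,33,34,35,36]

-- choose(cards, k): all k-element combinations, in order
def pvChoose (cards : List Int) (k : Nat) : List (List Int) :=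
  match k, cards with
  | 0, _ => [[]]
  | _ + 1, [] => []
  | k' + 1, first :: rest =>
      (pvChoose rest k').map (fun c => first :: c) ++ pvChoose rest (k' + 1)

def make_flops_alt (player_hand : List Int) (opp_hand : List Int) : List (List Int) :=
  pvChoose (pvNCardsB.filter (fun c => !player_hand.contains c && !opp_hand.contains c)) 3

-- ===== PRECONDITION & SPEC =====
def Spec_make_flops (player_hand : List Int) (opp_hand : List Int) (out : List (List Int)) : Prop := out = make_flops_alt player_hand opp_hand
instance (player_hand : List Int) (opp_hand : List Int) (out : List (List Int)) : Decidable (Spec_make_flops player_hand opp_hand out) := by unfold Spec_make_flops; infer_instance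

-- ===== CLAIM (what is proved, stated in full; the proofs are below) =====
def Claim_equal_make_flops : Prop := ∀ (player_hand : List Int) (opp_hand : List Int), Dom_make_flops player_hand opp_hand → Spec_make_flops player_hand opp_hand (make_flops player_hand opp_hand)

-- ===== LEMMAS AND PROOFS =====

-- `sorted [i,j,k]` with three distinct ints, written out
def pvSorted2 (j k : Int) : List Int := PySem.List.sorted [j, k] (fun x => x) false
def pvSorted3 (i j k : Int) : List Int := PySem.List.sorted [i, j, k] (fun x => x) false

-- dedup-append of one element, and the "already-started" dedup fold E
def pvIns (acc : List (List Int)) (x : List Int) : List (List Int) :=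
  if x ∈ acc then acc else acc ++ [x]

def pvE (acc : List (List Int)) : List (List Int) → List (List Int)
  | [] => []
  | x :: xs => if x ∈ acc then pvE acc xs else x :: pvE (acc ++ [x]) xs

-- candidate streams of A's nested loops
def pvCand3 (i j : Int) (l : List Int) : List (List Int) :=
  l.filterMap (fun k => if i ≠ k ∧ i ≠ j ∧ j ≠ k then some (pvSorted3 i j k) else none)

def pvS3 (l : List Int) : List (List Int) :=
  l.flatMap (fun i => l.flatMap (fun j => pvCand3 i j l))

def pvCand2 (j : Int) (l : List Int) : List (List Int) :=
  l.filterMap (fun k => if j ≠ k then some (pvSorted2 j k) else none)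

def pvS2 (l : List Int) : List (List Int) :=
  l.flatMap (fun j => pvCand2 j l)

theorem pvE_foldl (xs : List (List Int)) : ∀ acc, xs.foldl pvIns acc = acc ++ pvE acc xs := by
  induction xs with
  | nil => intro acc; simp [pvE]
  | cons x xs ih =>
      intro acc
      simp only [List.foldl_cons, pvE, pvIns]
      by_cases h : x ∈ acc
      · simp [h, ih]
      · simp [h, ih]

theorem pvE_append (xs ys : List (List Int)) :
    ∀ acc, pvE acc (xs ++ ys) = pvE acc xs ++ pvE (acc ++ pvE acc xs) ys := by
  induction xs with
  | nil => intro acc; simp [pvE]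
  | cons x xs ih =>
      intro acc
      by_cases h : x ∈ acc
      · simp [pvE, h, ih]
      · simp [pvE, h, ih]

theorem pvE_of_nodup (xs : List (List Int)) :
    ∀ acc, xs.Nodup → (∀ x ∈ xs, x ∉ acc) → pvE acc xs = xs := by
  induction xs with
  | nil => intro acc _ _; rfl
  | cons x xs ih =>
      intro acc hnd hna
      have hx : x ∉ acc := hna x (by simp)
      simp only [List.nodup_cons] at hnd
      have htail : pvE (acc ++ [x]) xs = xs := by
        apply ih _ hnd.2
        intro y hy
        simp only [List.mem_append, List.mem_singleton]
        rintro (h | rfl)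
        · exact hna y (by simp [hy]) h
        · exact hnd.1 hy
      simp only [pvE, if_neg hx, htail]

theorem pvE_map_cons (a : Int) (xs : List (List Int)) :
    ∀ acc, pvE (acc.map (fun t => a :: t)) (xs.map (fun t => a :: t)) =
      (pvE acc xs).map (fun t => a :: t) := by
  induction xs with
  | nil => intro acc; rfl
  | cons x xs ih =>
      intro acc
      have hmem : (a :: x) ∈ acc.map (fun t => a :: t) ↔ x ∈ acc := by
        constructor
        · intro h
          obtain ⟨y, hy, he⟩ := List.mem_map.1 h
          cases he; exact hy
        · intro h; exact List.mem_map.2 ⟨x, h, rfl⟩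
      by_cases h : x ∈ acc
      · simp only [List.map_cons, pvE, hmem.2 h, if_pos h]
        exact ih acc
      · simp only [List.map_cons, pvE, if_neg (fun hc => h (hmem.1 hc)), if_neg h, List.map_cons]
        have := ih (acc ++ [x])
        simp only [List.map_append, List.map_cons, List.map_nil] at this
        rw [this]

theorem pvE_filterP (xs : List (List Int)) :
    ∀ (P acc : List (List Int)), (∀ x ∈ acc, x ∉ P) →
      pvE (P ++ acc) xs = pvE acc (xs.filter (fun x => decide (x ∉ P))) := by
  induction xs with
  | nil => intro P acc _; rfl
  | cons x xs ih =>
      intro P acc hacc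
      by_cases hP : x ∈ P
      · have : x ∈ P ++ acc := List.mem_append.2 (Or.inl hP)
        simp only [pvE, if_pos this, List.filter_cons, decide_eq_true_eq]
        rw [if_neg (by simp [hP])]
        exact ih P acc hacc
      · by_cases hA : x ∈ acc
        · have : x ∈ P ++ acc := List.mem_append.2 (Or.inr hA)
          simp only [pvE, if_pos this, List.filter_cons]
          rw [if_pos (by simp [hP]), pvE, if_pos hA]
          exact ih P acc hacc
        · have hPA : x ∉ P ++ acc := by simp [hP, hA]
          simp only [pvE, if_neg hPA, List.filter_cons]
          rw [if_pos (by simp [hP]), pvE, if_neg hA]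
          have : P ++ acc ++ [x] = P ++ (acc ++ [x]) := by simp
          rw [this, ih P (acc ++ [x])]
          intro y hy
          rcases List.mem_append.1 hy with h | h
          · exact hacc y h
          · simp only [List.mem_singleton] at h; subst h; exact hP

-- A's nested loops compute the dedup fold of the candidate stream
theorem pvCand3_cons (i j k : Int) (l : List Int) :
    pvCand3 i j (k :: l) =
      (if i ≠ k ∧ i ≠ j ∧ j ≠ k then [pvSorted3 i j k] else []) ++ pvCand3 i j l := by
  simp only [pvCand3, List.filterMap_cons]
  split_ifs <;> simp

theorem pvCand2_cons (j k : Int) (l : List Int) :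
    pvCand2 j (k :: l) =
      (if j ≠ k then [pvSorted2 j k] else []) ++ pvCand2 j l := by
  simp only [pvCand2, List.filterMap_cons]
  split_ifs <;> simp

theorem pvFoldK (l : List Int) (i j : Int) :
    ∀ acc, l.foldl (fun flops k =>
        if i ≠ k ∧ i ≠ j ∧ j ≠ k ∧ PySem.List.sorted [i, j, k] (fun x => x) false ∉ flops
        then flops ++ [PySem.List.sorted [i, j, k] (fun x => x) false]
        else flops) acc = (pvCand3 i j l).foldl pvIns acc := by
  induction l with
  | nil => intro acc; rfl
  | cons k l ih =>
      intro acc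
      rw [pvCand3_cons]
      simp only [List.foldl_cons]
      by_cases hd : i ≠ k ∧ i ≠ j ∧ j ≠ k
      · rw [if_pos hd, List.singleton_append, List.foldl_cons]
        have hstep : (if i ≠ k ∧ i ≠ j ∧ j ≠ k ∧ PySem.List.sorted [i, j, k] (fun x => x) false ∉ acc
            then acc ++ [PySem.List.sorted [i, j, k] (fun x => x) false] else acc)
            = pvIns acc (pvSorted3 i j k) := by
          simp only [pvIns, pvSorted3]
          by_cases hm : PySem.List.sorted [i, j, k] (fun x => x) false ∈ acc
          · rw [if_neg (by tauto), if_pos hm]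
          · rw [if_pos ⟨hd.1, hd.2.1, hd.2.2, hm⟩, if_neg hm]
        rw [hstep]
        exact ih _
      · rw [if_neg hd, List.nil_append, if_neg (by tauto)]
        exact ih acc

theorem pvFoldJ (l possible : List Int) (i : Int) :
    ∀ acc, l.foldl (fun flops j =>
        possible.foldl (fun flops k =>
          if i ≠ k ∧ i ≠ j ∧ j ≠ k ∧ PySem.List.sorted [i, j, k] (fun x => x) false ∉ flops
          then flops ++ [PySem.List.sorted [i, j, k] (fun x => x) false]
          else flops) flops) acc
      = (l.flatMap (fun j => pvCand3 i j possible)).foldl pvIns acc := by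
  induction l with
  | nil => intro acc; rfl
  | cons j l ih =>
      intro acc
      simp only [List.foldl_cons, List.flatMap_cons, List.foldl_append]
      rw [pvFoldK, ih]

theorem pvFoldI (l possible : List Int) :
    ∀ acc, l.foldl (fun flops i =>
        possible.foldl (fun flops j =>
          possible.foldl (fun flops k =>
            if i ≠ k ∧ i ≠ j ∧ j ≠ k ∧ PySem.List.sorted [i, j, k] (fun x => x) false ∉ flops
            then flops ++ [PySem.List.sorted [i, j, k] (fun x => x) false]
            else flops) flops) flops) acc
      = (l.flatMap (fun i => possible.flatMap (fun j => pvCand3 i j possible))).foldl pvIns acc := by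
  induction l with
  | nil => intro acc; rfl
  | cons i l ih =>
      intro acc
      simp only [List.foldl_cons, List.flatMap_cons, List.foldl_append]
      rw [pvFoldJ, ih]

-- sorted of two / three distinct values, written out
theorem pvSorted2_lt {j k : Int} (h : j < k) : pvSorted2 j k = [j, k] := by
  apply PySem.List.sorted_eq_of_perm_of_pairwise_lt
  · exact List.Perm.refl _
  · simp [h]

theorem pvSorted2_gt {j k : Int} (h : k < j) : pvSorted2 j k = [k, j] := by
  apply PySem.List.sorted_eq_of_perm_of_pairwise_lt
  · exact List.Perm.swap j k []
  · simp [h]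

theorem pvPerm_swap12 (x y z : Int) : ([y, x, z] : List Int).Perm [x, y, z] :=
  List.Perm.swap x y [z]

theorem pvPerm_swap23 (x y z : Int) : ([x, z, y] : List Int).Perm [x, y, z] :=
  (List.Perm.swap y z []).cons x

theorem pvPerm_swap13 (x y z : Int) : ([z, y, x] : List Int).Perm [x, y, z] :=
  ((List.Perm.swap x y []).cons z).trans ((List.Perm.swap x z [y]).trans ((List.Perm.swap y z []).cons x))

theorem pvPerm_rotL (x y z : Int) : ([y, z, x] : List Int).Perm [x, y, z] :=
  (List.Perm.swap x z [] |>.cons y).trans (List.Perm.swap x y [z])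

theorem pvPerm_rotR (x y z : Int) : ([z, x, y] : List Int).Perm [x, y, z] :=
  (pvPerm_rotL z x y).symm.trans (List.Perm.refl _) |>.symm.symm

theorem pvSorted3_cons {a j k : Int} (h1 : a < j) (h2 : a < k) (h3 : j ≠ k) :
    pvSorted3 a j k = a :: pvSorted2 j k := by
  unfold pvSorted3
  rcases lt_or_gt_of_ne h3 with h | h
  · rw [pvSorted2_lt h]
    exact PySem.List.sorted_eq_of_perm_of_pairwise_lt _ _ _ (List.Perm.refl _) (by simp [h1, h2, h])
  · rw [pvSorted2_gt h]
    exact PySem.List.sorted_eq_of_perm_of_pairwise_lt _ _ _ (pvPerm_swap23 a j k) (by simp [h1, h2, h])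

theorem pvSorted3_mid {a i k : Int} (h1 : a < i) (h2 : a < k) (h3 : i ≠ k) :
    pvSorted3 i a k = a :: pvSorted2 i k := by
  unfold pvSorted3
  rcases lt_or_gt_of_ne h3 with h | h
  · rw [pvSorted2_lt h]
    exact PySem.List.sorted_eq_of_perm_of_pairwise_lt _ _ _ (pvPerm_swap12 i a k) (by simp [h1, h2, h])
  · rw [pvSorted2_gt h]
    exact PySem.List.sorted_eq_of_perm_of_pairwise_lt _ _ _ (pvPerm_rotL i a k) (by simp [h1, h2, h])

theorem pvSorted3_last {a i j : Int} (h1 : a < i) (h2 : a < j) (h3 : i ≠ j) :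
    pvSorted3 i j a = a :: pvSorted2 i j := by
  unfold pvSorted3
  rcases lt_or_gt_of_ne h3 with h | h
  · rw [pvSorted2_lt h]
    exact PySem.List.sorted_eq_of_perm_of_pairwise_lt _ _ _ (pvPerm_rotR i j a) (by simp [h1, h2, h])
  · rw [pvSorted2_gt h]
    exact PySem.List.sorted_eq_of_perm_of_pairwise_lt _ _ _ (pvPerm_swap13 i j a) (by simp [h1, h2, h])

theorem pvMem_sorted2 {x j k : Int} : x ∈ pvSorted2 j k ↔ (x = j ∨ x = k) := by
  rw [pvSorted2, PySem.List.mem_sorted]; simp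

theorem pvMem_sorted3 {x i j k : Int} : x ∈ pvSorted3 i j k ↔ (x = i ∨ x = j ∨ x = k) := by
  rw [pvSorted3, PySem.List.mem_sorted]; simp

-- choose l 1 lists the singletons
theorem pvChoose_one (l : List Int) : pvChoose l 1 = l.map (fun x => [x]) := by
  induction l with
  | nil => rfl
  | cons x l ih => simp [pvChoose, ih]

-- membership: every ascending pair of a strictly sorted list is in choose l 2
theorem pvMem_choose2 {l : List Int} (hl : l.Pairwise (· < ·)) {x y : Int}
    (hx : x ∈ l) (hy : y ∈ l) (hxy : x < y) : [x, y] ∈ pvChoose l 2 := by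
  induction l with
  | nil => cases hx
  | cons c r ih =>
      rw [List.pairwise_cons] at hl
      rcases List.mem_cons.1 hx with rfl | hx'
      · have hy' : y ∈ r := by
          rcases List.mem_cons.1 hy with rfl | h
          · exact absurd hxy (lt_irrefl _)
          · exact h
        show [x, y] ∈ (pvChoose r 1).map (fun c => x :: c) ++ pvChoose r 2
        apply List.mem_append.2 (Or.inl _)
        rw [pvChoose_one]
        simp only [List.map_map, List.mem_map]
        exact ⟨y, hy', rfl⟩
      · have hy' : y ∈ r := by
          rcases List.mem_cons.1 hy with rfl | h
          · exact absurd (hl.1 x hx') (fun h' => absurd (h'.trans hxy) (lt_irrefl _))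
          · exact h
        exact List.mem_append.2 (Or.inr (ih hl.2 hx' hy'))

theorem pvSorted2_mem_choose2 {l : List Int} (hl : l.Pairwise (· < ·)) {x y : Int}
    (hx : x ∈ l) (hy : y ∈ l) (hxy : x ≠ y) : pvSorted2 x y ∈ pvChoose l 2 := by
  rcases lt_or_gt_of_ne hxy with h | h
  · rw [pvSorted2_lt h]; exact pvMem_choose2 hl hx hy h
  · rw [pvSorted2_gt h]; exact pvMem_choose2 hl hy hx h

-- congruence helpers for flatMap / filterMap over members
theorem pvFlatMap_congr {α β : Type} (l : List α) (f g : α → List β)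
    (h : ∀ x ∈ l, f x = g x) : l.flatMap f = l.flatMap g := by
  induction l with
  | nil => rfl
  | cons x l ih =>
      simp only [List.flatMap_cons, h x (by simp)]
      rw [ih (fun y hy => h y (by simp [hy]))]

theorem pvFilterMap_congr {α β : Type} (l : List α) (f g : α → Option β)
    (h : ∀ x ∈ l, f x = g x) : l.filterMap f = l.filterMap g := by
  induction l with
  | nil => rfl
  | cons x l ih =>
      simp only [List.filterMap_cons, h x (by simp)]
      rw [ih (fun y hy => h y (by simp [hy]))]

theorem pvFilter_flatMap {α β : Type} (l : List α) (f : α → List β) (p : β → Bool) :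
    (l.flatMap f).filter p = l.flatMap (fun x => (f x).filter p) := by
  induction l with
  | nil => rfl
  | cons x l ih => simp [List.flatMap_cons, List.filter_append, ih]

-- main lemma, pair level: the dedup fold of A's (j,k)-stream is choose l 2
theorem pvMain2 (l : List Int) (hl : l.Pairwise (· < ·)) : pvE [] (pvS2 l) = pvChoose l 2 := by
  induction l with
  | nil => rfl
  | cons b u ih =>
      rw [List.pairwise_cons] at hl
      obtain ⟨hb, hu⟩ := hl
      have hbu : b ∉ u := fun h => absurd (hb b h) (lt_irrefl b)
      have hund : u.Nodup := hu.imp (fun h => ne_of_lt h)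
      -- the first block of the stream: j = b
      have hblock1 : pvCand2 b (b :: u) = u.map (fun k => [b, k]) := by
        rw [pvCand2_cons, if_neg (by tauto), List.nil_append, pvCand2]
        rw [pvFilterMap_congr u _ (fun k => some [b, k])
          (by intro k hk
              rw [if_pos (ne_of_lt (hb k hk)), pvSorted2_lt (hb k hk)])]
        simp
      have hS2 : pvS2 (b :: u) = u.map (fun k => [b, k]) ++ u.flatMap (fun j => pvCand2 j (b :: u)) := by
        rw [pvS2, List.flatMap_cons, hblock1]
      set P : List (List Int) := u.map (fun k => [b, k]) with hPdef
      have hP : pvE [] P = P := by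
        apply pvE_of_nodup
        · exact (List.nodup_map_iff_inj_on hund).2 (fun x _ y _ h => by
            injection h with h1 h2; injection h2)
        · intro x _; simp
      have hmemP : ∀ x ∈ P, b ∈ x := by
        intro x hx
        obtain ⟨k, _, rfl⟩ := List.mem_map.1 hx
        simp
      have hrow : ∀ j ∈ u, pvCand2 j (b :: u) = [b, j] :: pvCand2 j u := by
        intro j hj
        have hbj : b < j := hb j hj
        rw [pvCand2_cons, if_pos (ne_of_gt hbj), pvSorted2_gt hbj, List.singleton_append]
      have hnotP : ∀ j ∈ u, ∀ x ∈ pvCand2 j u, x ∉ P := by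
        intro j hj x hx hxP
        obtain ⟨k, hk, hcond⟩ := List.mem_filterMap.1 hx
        by_cases h : j ≠ k
        · rw [if_pos h] at hcond
          cases hcond
          have hbx : b ∈ pvSorted2 j k := hmemP _ hxP
          rcases pvMem_sorted2.1 hbx with rfl | rfl
          · exact hbu hj
          · exact hbu hk
        · rw [if_neg h] at hcond; cases hcond
      have hfilter : (u.flatMap (fun j => pvCand2 j (b :: u))).filter (fun x => decide (x ∉ P)) = pvS2 u := by
        rw [pvFilter_flatMap, pvS2]
        apply pvFlatMap_congr
        intro j hj
        rw [hrow j hj, List.filter_cons]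
        have hmem : [b, j] ∈ P := List.mem_map.2 ⟨j, hj, rfl⟩
        rw [if_neg (by simp [hmem])]
        exact List.filter_eq_self.2 (fun x hx => by simp [hnotP j hj x hx])
      have hEP : pvE P (u.flatMap (fun j => pvCand2 j (b :: u))) =
          pvE [] ((u.flatMap (fun j => pvCand2 j (b :: u))).filter (fun x => decide (x ∉ P))) := by
        have := pvE_filterP (u.flatMap (fun j => pvCand2 j (b :: u))) P []
          (by intro x hx; cases hx)
        simpa using this
      rw [hS2, pvE_append, hP, List.nil_append, hEP, hfilter, ih hu]
      show P ++ pvChoose u 2 = pvChoose (b :: u) 2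
      have h2 : pvChoose (b :: u) 2 = (pvChoose u 1).map (fun c => b :: c) ++ pvChoose u 2 := rfl
      rw [h2, pvChoose_one, List.map_map]
      rfl

-- main lemma, triple level: the dedup fold of A's (i,j,k)-stream is choose l 3
theorem pvMain3 (l : List Int) (hl : l.Pairwise (· < ·)) : pvE [] (pvS3 l) = pvChoose l 3 := by
  induction l with
  | nil => rfl
  | cons a t ih =>
      rw [List.pairwise_cons] at hl
      obtain ⟨ha, ht⟩ := hl
      have hat : a ∉ t := fun h => absurd (ha a h) (lt_irrefl a)
      -- first block: i = a
      have hcand_aa : pvCand3 a a (a :: t) = [] := by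
        apply List.filterMap_eq_nil_iff.2
        intro k _
        rw [if_neg (by tauto)]
      have hcand_aj : ∀ j ∈ t, pvCand3 a j (a :: t) = (pvCand2 j t).map (fun c => a :: c) := by
        intro j hj
        have haj : a < j := ha j hj
        rw [pvCand3_cons, if_neg (by tauto), List.nil_append, pvCand3, pvCand2, List.map_filterMap]
        apply pvFilterMap_congr
        intro k hk
        have hak : a < k := ha k hk
        by_cases h : j ≠ k
        · rw [if_pos ⟨ne_of_lt hak, ne_of_lt haj, h⟩, if_pos h, pvSorted3_cons haj hak h]
          rfl
        · rw [if_neg (by tauto), if_neg h]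
          rfl
      have hblock1 : t.flatMap (fun j => pvCand3 a j (a :: t)) = (pvS2 t).map (fun c => a :: c) := by
        rw [pvS2, List.map_flatMap]
        exact pvFlatMap_congr _ _ _ hcand_aj
      have hS3 : pvS3 (a :: t) = (pvS2 t).map (fun c => a :: c)
          ++ t.flatMap (fun i => pvCand3 i a (a :: t) ++ t.flatMap (fun j => pvCand3 i j (a :: t))) := by
        simp only [pvS3, List.flatMap_cons, hcand_aa, List.nil_append]
        rw [← hblock1]
      set P : List (List Int) := (pvChoose t 2).map (fun c => a :: c) with hPdef
      have hEblock1 : pvE [] ((pvS2 t).map (fun c => a :: c)) = P := by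
        have hmc := pvE_map_cons a (pvS2 t) []
        simp only [List.map_nil] at hmc
        rw [hmc, pvMain2 t ht]
      have hPa : ∀ x ∈ P, a ∈ x := by
        intro x hx
        obtain ⟨c, _, rfl⟩ := List.mem_map.1 hx
        simp
      have hinP : ∀ x y : Int, x ∈ t → y ∈ t → x ≠ y → a :: pvSorted2 x y ∈ P :=
        fun x y hx hy hxy => List.mem_map.2 ⟨pvSorted2 x y, pvSorted2_mem_choose2 ht hx hy hxy, rfl⟩
      have hnotP3 : ∀ i ∈ t, ∀ j ∈ t, ∀ x ∈ pvCand3 i j t, x ∉ P := by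
        intro i hi j hj x hx hxP
        obtain ⟨k, hk, hcond⟩ := List.mem_filterMap.1 hx
        by_cases h : i ≠ k ∧ i ≠ j ∧ j ≠ k
        · rw [if_pos h] at hcond
          cases hcond
          have hax : a ∈ pvSorted3 i j k := hPa _ hxP
          have hmem : a ∈ t := by
            rcases pvMem_sorted3.1 hax with rfl | rfl | rfl
            · exact hi
            · exact hj
            · exact hk
          exact hat hmem
        · rw [if_neg h] at hcond; cases hcond
      have hrow_ia : ∀ i ∈ t, pvCand3 i a (a :: t)
          = t.filterMap (fun k => if i ≠ k then some (a :: pvSorted2 i k) else none) := by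
        intro i hi
        have hai : a < i := ha i hi
        rw [pvCand3_cons, if_neg (by tauto), List.nil_append, pvCand3]
        apply pvFilterMap_congr
        intro k hk
        have hak : a < k := ha k hk
        by_cases h : i ≠ k
        · rw [if_pos ⟨h, ne_of_gt hai, ne_of_lt hak⟩, if_pos h, pvSorted3_mid hai hak h]
        · rw [if_neg (by tauto), if_neg h]
      have hrow_ia_P : ∀ i ∈ t, ∀ x ∈ pvCand3 i a (a :: t), x ∈ P := by
        intro i hi x hx
        rw [hrow_ia i hi] at hx
        obtain ⟨k, hk, hcond⟩ := List.mem_filterMap.1 hx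
        by_cases h : i ≠ k
        · rw [if_pos h] at hcond
          cases hcond
          exact hinP i k hi hk h
        · rw [if_neg h] at hcond; cases hcond
      have hrow_ij : ∀ i ∈ t, ∀ j ∈ t, pvCand3 i j (a :: t)
          = (if i ≠ j then [a :: pvSorted2 i j] else []) ++ pvCand3 i j t := by
        intro i hi j hj
        have hai : a < i := ha i hi
        have haj : a < j := ha j hj
        rw [pvCand3_cons]
        congr 1
        by_cases h : i ≠ j
        · rw [if_pos ⟨ne_of_gt hai, h, ne_of_gt haj⟩, if_pos h, pvSorted3_last hai haj h]
        · rw [if_neg (by tauto), if_neg h]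
      have hfilter : ((t.flatMap (fun i => pvCand3 i a (a :: t) ++ t.flatMap (fun j => pvCand3 i j (a :: t))))).filter
          (fun x => decide (x ∉ P)) = pvS3 t := by
        rw [pvFilter_flatMap, pvS3]
        apply pvFlatMap_congr
        intro i hi
        rw [List.filter_append, pvFilter_flatMap]
        have h1 : (pvCand3 i a (a :: t)).filter (fun x => decide (x ∉ P)) = [] := by
          apply List.filter_eq_nil_iff.2
          intro x hx
          simpa using hrow_ia_P i hi x hx
        have h2 : ∀ j ∈ t, (pvCand3 i j (a :: t)).filter (fun x => decide (x ∉ P)) = pvCand3 i j t := by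
          intro j hj
          rw [hrow_ij i hi j hj, List.filter_append]
          have hhead : ((if i ≠ j then [a :: pvSorted2 i j] else []) : List (List Int)).filter
              (fun x => decide (x ∉ P)) = [] := by
            by_cases h : i ≠ j
            · rw [if_pos h]
              have hm : a :: pvSorted2 i j ∈ P := hinP i j hi hj h
              simp [hm]
            · rw [if_neg h]; rfl
          have htail : (pvCand3 i j t).filter (fun x => decide (x ∉ P)) = pvCand3 i j t :=
            List.filter_eq_self.2 (fun x hx => by simp [hnotP3 i hi j hj x hx])
          rw [hhead, htail, List.nil_append]
        rw [h1, List.nil_append]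
        exact pvFlatMap_congr _ _ _ h2
      have hEP : pvE P (t.flatMap (fun i => pvCand3 i a (a :: t) ++ t.flatMap (fun j => pvCand3 i j (a :: t)))) =
          pvE [] (((t.flatMap (fun i => pvCand3 i a (a :: t) ++ t.flatMap (fun j => pvCand3 i j (a :: t))))).filter
            (fun x => decide (x ∉ P))) := by
        have := pvE_filterP (t.flatMap (fun i => pvCand3 i a (a :: t) ++ t.flatMap (fun j => pvCand3 i j (a :: t)))) P []
          (by intro x hx; cases hx)
        simpa using this
      rw [hS3, pvE_append, hEblock1, List.nil_append, hEP, hfilter, ih ht]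
      show P ++ pvChoose t 3 = pvChoose (a :: t) 3
      rfl

-- the removal loops compute a filter (on a Nodup list)
theorem pvRemoveLoop_eq (hand : List Int) :
    ∀ l : List Int, l.Nodup → pvRemoveLoop l hand = l.filter (fun c => !hand.contains c) := by
  induction hand with
  | nil =>
      intro l _
      simp [pvRemoveLoop]
  | cons num hand ih =>
      intro l hnd
      have hstep : (if num ∈ l then (PySem.List.remove? l num).getD l else l)
          = l.filter (fun c => decide (c ≠ num)) := by
        by_cases h : num ∈ l
        · have hre : PySem.List.remove? l num = some (l.erase num) := by
            apply PySem.List.remove?_eq_some_erase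
            exact h
          rw [if_pos h, hre, Option.getD_some, List.Nodup.erase_eq_filter hnd]
          apply List.filter_congr
          intro x _
          by_cases hxe : x = num
          · subst hxe; simp
          · simp [hxe]
        · rw [if_neg h]
          symm
          apply List.filter_eq_self.2
          intro x hx
          simp only [decide_eq_true_eq]
          exact fun hc => h (hc ▸ hx)
      have hsplit : pvRemoveLoop l (num :: hand)
          = pvRemoveLoop (if num ∈ l then (PySem.List.remove? l num).getD l else l) hand := rfl
      rw [hsplit, hstep, ih _ (hnd.filter _), List.filter_filter]
      apply List.filter_congr
      intro x _
      simp [Bool.and_comm]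

-- ===== VERDICT (by name: the statement is the Claim_ definition above) =====
theorem make_flops_spec : Claim_equal_make_flops := by
  intro ph oh _
  show make_flops ph oh = make_flops_alt ph oh
  have h1 : pvNCards.Nodup := by decide
  have hposs : pvPossible ph oh = pvNCards.filter (fun c => !ph.contains c && !oh.contains c) := by
    rw [pvPossible, pvRemoveLoop_eq ph pvNCards h1, pvRemoveLoop_eq oh _ (h1.filter _), List.filter_filter]
    apply List.filter_congr
    intro x _
    simp [Bool.and_comm]
  have hsorted : (pvPossible ph oh).Pairwise (· < ·) := by
    rw [hposs]
    exact List.Pairwise.filter _ (by decide : pvNCards.Pairwise (· < ·))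
  have hm := pvMain3 _ hsorted
  rw [pvS3] at hm
  rw [make_flops, pvFoldI, pvE_foldl, List.nil_append, hm, hposs]
  show pvChoose (pvNCards.filter _) 3 = pvChoose (pvNCardsB.filter _) 3
  rfl
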